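-- pv_equiv track=rewrite | github.com/marcuspeh/leetcode-solutions | 2946-matrix-similarity-after-cyclic-shifts/2946-matrix-similarity-after-cyclic-shifts.py | areSimilar
-- ===== SOURCE A (Python) =====
-- from typing import List
--
-- def areSimilar(mat: List[List[int]], k: int) -> bool:
--     k = k % len(mat[0])
--     for i in range(len(mat)):
--         row = mat[i]
--         for j in range(len(row)):
--             if row[j] != row[(j + k) % len(row)]:
--                 return False
--
--     return True
-- ===== SOURCE B (Python) =====
-- from typing import List
--
-- def areSimilar(mat: List[List[int]], k: int) -> bool:
--     k = k % len(mat[0])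
--     for row in mat:
--         if row:
--             r = k % len(row)
--             if row != row[r:] + row[:r]:
--                 return False
--     return True
-- ===== Notes on version B (the rewrite author's own statement) =====
-- stated objective: simpler
-- what changed: Replaces A's inner element-by-element index loop with modular arithmetic by a single whole-row comparison against the row's rotation built once by slicing (row == row[r:] + row[:r], r = k % len(row)).
import Mathlib
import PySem

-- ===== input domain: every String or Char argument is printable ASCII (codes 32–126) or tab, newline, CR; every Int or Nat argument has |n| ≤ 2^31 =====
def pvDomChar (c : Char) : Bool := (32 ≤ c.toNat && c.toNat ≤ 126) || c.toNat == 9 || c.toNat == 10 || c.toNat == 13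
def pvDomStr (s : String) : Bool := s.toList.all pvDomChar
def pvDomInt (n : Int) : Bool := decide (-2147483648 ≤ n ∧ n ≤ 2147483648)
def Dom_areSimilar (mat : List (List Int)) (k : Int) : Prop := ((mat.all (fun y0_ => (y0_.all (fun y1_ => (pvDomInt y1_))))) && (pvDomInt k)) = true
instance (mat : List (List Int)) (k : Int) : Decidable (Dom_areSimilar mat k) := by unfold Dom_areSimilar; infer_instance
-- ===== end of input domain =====

-- B replaces A's inner index loop with one whole-row comparison against the row's
-- rotation built by slicing (objective: simpler). Equivalence is about the returned
-- value; neither program mutates its arguments.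

-- ===== PORT A =====
-- literal port of A: k = k % len(mat[0]) (mod? is none where Python raises, excluded by Pre_),
-- then for each row index i every j is checked against (j + k) % len(row).
def areSimilar (mat : List (List Int)) (k : Int) : Bool :=
  match mat.head? with
  | none => false   -- Python: IndexError on mat[0]; excluded by Pre_
  | some row0 =>
    match PySem.Int.mod? k (PySem.List.len row0) with
    | none => false -- Python: ZeroDivisionError on k % 0; excluded by Pre_
    | some k1 =>
      (PySem.List.pyRange 0 (PySem.List.len mat) 1).all (fun i =>
        (PySem.List.pyRange 0 (PySem.List.len (PySem.List.pyGetD mat i [])) 1).all (fun j =>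
          PySem.List.pyGetD (PySem.List.pyGetD mat i []) j 0
            == PySem.List.pyGetD (PySem.List.pyGetD mat i [])
                 (PySem.Int.mod (j + k1) (PySem.List.len (PySem.List.pyGetD mat i []))) 0))

-- ===== PORT B =====
-- literal port of B: k = k % len(mat[0]); for each nonempty row, r = k % len(row) and
-- the row is compared with row[r:] + row[:r].
def areSimilar_alt (mat : List (List Int)) (k : Int) : Bool :=
  match mat.head? with
  | none => false   -- Python: IndexError on mat[0]; excluded by Pre_
  | some row0 =>
    match PySem.Int.mod? k (PySem.List.len row0) with
    | none => false -- Python: ZeroDivisionError on k % 0; excluded by Pre_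
    | some k1 =>
      mat.all (fun row =>
        if row.isEmpty then true
        else
          row == (PySem.List.slice row (some (PySem.Int.mod k1 (PySem.List.len row))) none
                 ++ PySem.List.slice row none (some (PySem.Int.mod k1 (PySem.List.len row)))))

-- ===== PRECONDITION & SPEC =====
-- Pre_ excludes exactly the inputs where Python A raises: empty mat (IndexError on mat[0])
-- and empty first row (ZeroDivisionError on k % 0).
def Pre_areSimilar (mat : List (List Int)) (k : Int) : Prop := mat ≠ [] ∧ mat.headI ≠ []
instance (mat : List (List Int)) (k : Int) : Decidable (Pre_areSimilar mat k) := by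
  unfold Pre_areSimilar; infer_instance
def pvWitness_areSimilar : List (List Int) × Int := ([[1, 2, 1, 2], [5, 5, 5, 5]], 2)

def Spec_areSimilar (mat : List (List Int)) (k : Int) (out : Bool) : Prop := out = areSimilar_alt mat k
instance (mat : List (List Int)) (k : Int) (out : Bool) : Decidable (Spec_areSimilar mat k out) := by
  unfold Spec_areSimilar; infer_instance

-- ===== CLAIM (what is proved, stated in full; the proofs are below) =====
def Claim_equal_areSimilar : Prop := ∀ (mat : List (List Int)) (k : Int), Dom_areSimilar mat k → Pre_areSimilar mat k → Spec_areSimilar mat k (areSimilar mat k)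

-- ===== LEMMAS AND PROOFS =====

-- element j of the left-rotation of `row` by kt % len is element (j + kt) % len of `row`
lemma rot_getElem (row : List Int) (kt j : Nat) (hj : j < row.length) :
    (row.drop (kt % row.length) ++ row.take (kt % row.length))[j]'(by
      simp [List.length_append]; omega) =
    row[(j + kt) % row.length]'(Nat.mod_lt _ (by omega)) := by
  have hn0 : 0 < row.length := by omega
  have hrnlt : kt % row.length < row.length := Nat.mod_lt _ hn0
  have hmm : (j + kt) % row.length = (j + kt % row.length) % row.length :=
    (Nat.add_mod_mod j kt row.length).symm
  by_cases hc : j < row.length - kt % row.length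
  · rw [List.getElem_append_left (by simp; omega), List.getElem_drop]
    have hidx : (j + kt) % row.length = kt % row.length + j := by
      rw [hmm, Nat.mod_eq_of_lt (by omega)]; omega
    simp [hidx]
  · rw [List.getElem_append_right (by simp; omega), List.getElem_take]
    have hidx : (j + kt) % row.length = j - (row.length - kt % row.length) := by
      rw [hmm, Nat.mod_eq_sub_mod (by omega), Nat.mod_eq_of_lt (by omega)]; omega
    simp [hidx]

-- A's inner index loop over one row equals B's rotate-and-compare for that row
lemma row_check_eq (row : List Int) (kt : Nat) :
    ((PySem.List.pyRange 0 (PySem.List.len row) 1).all (fun j =>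
        PySem.List.pyGetD row j 0
          == PySem.List.pyGetD row (PySem.Int.mod (j + (kt : Int)) (PySem.List.len row)) 0))
  = (if row.isEmpty then true
     else row == (PySem.List.slice row (some (PySem.Int.mod (kt : Int) (PySem.List.len row))) none
                 ++ PySem.List.slice row none (some (PySem.Int.mod (kt : Int) (PySem.List.len row))))) := by
  by_cases hrow : row = []
  · subst hrow
    simp [PySem.List.len, PySem.List.pyRange_one_eq_nil]
  · have hn0 : 0 < row.length := List.length_pos_iff.mpr hrow
    have hisE : row.isEmpty = false := by simp [hrow]
    rw [hisE]
    simp only [Bool.false_eq_true, if_false]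
    have hlen : PySem.List.len row = (row.length : Int) := by simp [PySem.List.len]
    have hmodk : PySem.Int.mod (kt : Int) (PySem.List.len row) = ((kt % row.length : Nat) : Int) := by
      rw [hlen]; exact PySem.Int.mod_natCast kt row.length
    have hcast : ∀ j : Nat, PySem.Int.mod ((j : Int) + (kt : Int)) ((row.length : Nat) : Int)
        = (((j + kt) % row.length : Nat) : Int) := by
      intro j
      rw [show ((j : Int) + (kt : Int)) = ((j + kt : Nat) : Int) by push_cast; ring]
      exact PySem.Int.mod_natCast (j + kt) row.length
    rw [hmodk, PySem.List.slice_from_natCast, PySem.List.slice_to_natCast, hlen,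
      PySem.List.pyRange_zero_nat, List.all_map]
    rw [Bool.eq_iff_iff]
    simp only [Function.comp, List.all_eq_true, List.mem_range, beq_iff_eq]
    constructor
    · intro h
      apply List.ext_getElem
      · simp [List.length_append]; omega
      · intro j hj _
        rw [rot_getElem row kt j hj]
        have hall := h j hj
        rw [hcast j, PySem.List.pyGetD_natCast, PySem.List.pyGetD_natCast,
          List.getD_eq_getElem row 0 hj,
          List.getD_eq_getElem row 0 (Nat.mod_lt _ hn0)] at hall
        exact hall
    · intro h j hj
      rw [hcast j, PySem.List.pyGetD_natCast, PySem.List.pyGetD_natCast,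
        List.getD_eq_getElem row 0 hj, List.getD_eq_getElem row 0 (Nat.mod_lt _ hn0)]
      rw [← rot_getElem row kt j hj]
      simp only [← h]

-- A's outer index loop visits exactly the rows of the matrix, in order
lemma outer_loop_eq (m : List (List Int)) (g : List Int → Bool) :
    (PySem.List.pyRange 0 (PySem.List.len m) 1).all
        (fun i => g (PySem.List.pyGetD m i [])) = m.all g := by
  conv_rhs => rw [← PySem.List.map_pyGetD_pyRange_zero m ([] : List Int)]
  rw [List.all_map]
  rfl

-- ===== VERDICT (by name: the statement is the Claim_ definition above) =====
theorem areSimilar_spec : Claim_equal_areSimilar := by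
  intro mat k _ hpre
  unfold Spec_areSimilar areSimilar areSimilar_alt
  cases mat with
  | nil => exact absurd rfl hpre.1
  | cons row0 rest =>
    have hrow0 : row0 ≠ [] := by simpa [Pre_areSimilar, List.headI] using hpre.2
    have hmod? : PySem.Int.mod? k (PySem.List.len row0)
        = some (PySem.Int.mod k (PySem.List.len row0)) := by
      simp [PySem.Int.mod?, PySem.Int.mod, PySem.List.len, hrow0]
    simp only [List.head?_cons, hmod?]
    have hk1nn : 0 ≤ PySem.Int.mod k (PySem.List.len row0) := by
      apply PySem.Int.mod_nonneg
      simp only [PySem.List.len]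
      have := List.length_pos_iff.mpr hrow0
      omega
    obtain ⟨kt, hkt⟩ : ∃ kt : Nat, PySem.Int.mod k (PySem.List.len row0) = (kt : Int) :=
      ⟨_, (Int.toNat_of_nonneg hk1nn).symm⟩
    simp only [hkt]
    exact (outer_loop_eq (row0 :: rest) _).trans
      (congrArg _ (funext fun row => row_check_eq row kt))
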